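-- pv_equiv track=rewrite | github.com/figlerg/VolTRE | tests/file_helper.py | selected_tre_files
-- ===== SOURCE A (Python) =====
-- def selected_tre_files(positive_files, negative_files = None):
--     if not negative_files:
--         negative_files = []
--
--
--
--     # List of tuples with file paths and whether they are expected to fail
--     tests = [
--         (file_path, False) for file_path in positive_files  # only those that should work
--     ]
--
--     tests += [(file_path, True) for file_path in negative_files]
--
--     return sorted(tests, key=lambda x: (x[1], x[0]))
-- ===== SOURCE B (Python) =====
-- def selected_tre_files(positive_files, negative_files=None):
--     if not negative_files:
--         negative_files = []
--     pos = [(p, False) for p in sorted(positive_files)]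
--     neg = [(p, True) for p in sorted(negative_files)]
--     return pos + neg
-- ===== Notes on version B (the rewrite author's own statement) =====
-- stated objective: simpler
-- what changed: Replaces the single composite-key (flag, path) sort over the concatenated labelled pair list with two independent path-only sorts of the raw input lists, mapping the flags on afterwards and concatenating (positives always precede negatives under the composite key).
import Mathlib
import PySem

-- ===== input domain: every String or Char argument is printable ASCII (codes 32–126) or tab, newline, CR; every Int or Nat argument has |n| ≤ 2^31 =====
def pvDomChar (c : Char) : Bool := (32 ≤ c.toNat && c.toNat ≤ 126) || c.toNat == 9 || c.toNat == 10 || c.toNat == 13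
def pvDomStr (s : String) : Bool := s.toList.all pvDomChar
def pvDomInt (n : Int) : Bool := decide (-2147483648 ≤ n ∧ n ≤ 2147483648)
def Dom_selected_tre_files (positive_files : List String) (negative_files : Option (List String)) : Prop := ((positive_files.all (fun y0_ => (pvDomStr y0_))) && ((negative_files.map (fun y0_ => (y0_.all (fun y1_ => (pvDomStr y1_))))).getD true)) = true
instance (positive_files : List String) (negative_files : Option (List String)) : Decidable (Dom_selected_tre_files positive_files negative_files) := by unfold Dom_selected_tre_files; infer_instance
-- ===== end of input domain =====

-- B replaces A's single composite-key sort of the labelled concatenation by two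
-- independent path-only sorts of the raw lists, labelled afterwards (simpler).

-- ===== PORT A =====
-- `if not negative_files: negative_files = []` — None or [] become []
def pvNegList (negative_files : Option (List String)) : List String :=
  match negative_files with
  | none => []
  | some l => if l = [] then [] else l

def selected_tre_files (positive_files : List String) (negative_files : Option (List String)) : List (String × Bool) :=
  let negs := pvNegList negative_files
  let tests : List (String × Bool) := positive_files.map (fun file_path => (file_path, false))
  let tests := tests ++ negs.map (fun file_path => (file_path, true))
  PySem.List.sorted2 tests (fun x => x.2) (fun x => x.1)

-- ===== PORT B =====
def selected_tre_files_alt (positive_files : List String) (negative_files : Option (List String)) : List (String × Bool) :=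
  let negs := pvNegList negative_files
  let pos := (PySem.List.sorted positive_files (fun s => s)).map (fun p => (p, false))
  let neg := (PySem.List.sorted negs (fun s => s)).map (fun p => (p, true))
  pos ++ neg

-- ===== PRECONDITION & SPEC =====
def Spec_selected_tre_files (positive_files : List String) (negative_files : Option (List String)) (out : List (String × Bool)) : Prop := out = selected_tre_files_alt positive_files negative_files
instance (positive_files : List String) (negative_files : Option (List String)) (out : List (String × Bool)) : Decidable (Spec_selected_tre_files positive_files negative_files out) := by unfold Spec_selected_tre_files; infer_instance

-- ===== CLAIM (what is proved, stated in full; the proofs are below) =====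
def Claim_equal_selected_tre_files : Prop := ∀ (positive_files : List String) (negative_files : Option (List String)), Dom_selected_tre_files positive_files negative_files → Spec_selected_tre_files positive_files negative_files (selected_tre_files positive_files negative_files)

-- ===== LEMMAS AND PROOFS =====

-- the comparison used by sorted2 with keys (flag, path)
def pvB2 (a b : String × Bool) : Bool :=
  decide (a.2 < b.2) || (!decide (b.2 < a.2) && decide (a.1 < b.1))

def pvB1 (a b : String × Bool) : Bool := decide (a.1 < b.1)

theorem pvB2_same_flag (f : Bool) (a b : String × Bool) (ha : a.2 = f) (hb : b.2 = f) :
    pvB2 a b = pvB1 a b := by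
  simp [pvB2, pvB1, ha, hb]

theorem pvB2_true_false (a b : String × Bool) (ha : a.2 = true) (hb : b.2 = false) :
    pvB2 a b = false := by
  simp [pvB2, ha, hb]

-- inserting with pvB2 into a same-flag list = inserting with pvB1
theorem insertBy_b2_eq_b1 (f : Bool) (x : String × Bool) (hx : x.2 = f) :
    ∀ (acc : List (String × Bool)), (∀ y ∈ acc, y.2 = f) →
      PySem.List.insertBy pvB2 x acc = PySem.List.insertBy pvB1 x acc := by
  intro acc
  induction acc with
  | nil => intro _; rfl
  | cons y ys ih =>
      intro h
      simp only [PySem.List.insertBy]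
      rw [pvB2_same_flag f x y hx (h y (by simp))]
      split_ifs with hc
      · rfl
      · rw [ih (fun z hz => h z (by simp [hz]))]

-- inserting a true-flagged element skips an all-false prefix
theorem insertBy_b2_skip (x : String × Bool) (hx : x.2 = true) :
    ∀ (S T : List (String × Bool)), (∀ y ∈ S, y.2 = false) →
      PySem.List.insertBy pvB2 x (S ++ T) = S ++ PySem.List.insertBy pvB2 x T := by
  intro S
  induction S with
  | nil => intro T _; rfl
  | cons y ys ih =>
      intro T h
      simp only [List.cons_append, PySem.List.insertBy]
      rw [pvB2_true_false x y hx (h y (by simp))]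
      simp only [Bool.false_eq_true, if_false]
      rw [ih T (fun z hz => h z (by simp [hz]))]

theorem mem_insertBy' {α : Type} (before : α → α → Bool) (x : α) (ys : List α) (z : α)
    (hz : z ∈ PySem.List.insertBy before x ys) : z = x ∨ z ∈ ys :=
  (PySem.List.mem_insertBy _ _ _ _).1 hz

-- fold over same-flag elements, same-flag accumulator: pvB2 = pvB1, and flags stay f
theorem foldl_insertBy_b2_eq_b1 (f : Bool) :
    ∀ (xs acc : List (String × Bool)), (∀ y ∈ xs, y.2 = f) → (∀ y ∈ acc, y.2 = f) →
      xs.foldl (fun a x => PySem.List.insertBy pvB2 x a) acc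
        = xs.foldl (fun a x => PySem.List.insertBy pvB1 x a) acc := by
  intro xs
  induction xs with
  | nil => intro acc _ _; rfl
  | cons x xs ih =>
      intro acc hxs hacc
      simp only [List.foldl_cons]
      rw [insertBy_b2_eq_b1 f x (hxs x (by simp)) acc hacc]
      exact ih _ (fun y hy => hxs y (by simp [hy]))
        (fun y hy => (mem_insertBy' pvB1 x acc y hy).elim
          (fun h => h ▸ hxs x (by simp)) (fun h => hacc y h))

-- fold of all-true elements over an all-false prefix S ++ T inserts into T only
theorem foldl_insertBy_b2_append (S : List (String × Bool)) (hS : ∀ y ∈ S, y.2 = false) :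
    ∀ (xs T : List (String × Bool)), (∀ y ∈ xs, y.2 = true) →
      xs.foldl (fun a x => PySem.List.insertBy pvB2 x a) (S ++ T)
        = S ++ xs.foldl (fun a x => PySem.List.insertBy pvB2 x a) T := by
  intro xs
  induction xs with
  | nil => intro T _; rfl
  | cons x xs ih =>
      intro T hxs
      simp only [List.foldl_cons]
      rw [insertBy_b2_skip x (hxs x (by simp)) S T hS]
      exact ih _ (fun y hy => hxs y (by simp [hy]))

-- insertion commutes with labelling by a constant flag
theorem insertBy_map_label (f : Bool) (p : String) (ys : List String) :
    PySem.List.insertBy pvB1 (p, f) (ys.map (fun q => (q, f)))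
      = (PySem.List.insertBy (fun a b => decide (a < b)) p ys).map (fun q => (q, f)) := by
  induction ys with
  | nil => rfl
  | cons y ys ih =>
      simp only [List.map_cons, PySem.List.insertBy, pvB1]
      split_ifs with hc
      · rfl
      · rw [ih]; rfl

theorem foldl_insertBy_map_label (f : Bool) :
    ∀ (xs acc : List String),
      (xs.map (fun q => (q, f))).foldl (fun a x => PySem.List.insertBy pvB1 x a)
          (acc.map (fun q => (q, f)))
        = (xs.foldl (fun a x => PySem.List.insertBy (fun u v => decide (u < v)) x a) acc).map
            (fun q => (q, f)) := by
  intro xs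
  induction xs with
  | nil => intro acc; rfl
  | cons x xs ih =>
      intro acc
      simp only [List.map_cons, List.foldl_cons]
      rw [insertBy_map_label f x acc, ih]

-- sorting flag-labelled pairs by pvB1 = labelling the sorted raw list
theorem sorted_label (f : Bool) (xs : List String) :
    (xs.map (fun q => (q, f))).foldl (fun a x => PySem.List.insertBy pvB1 x a) []
      = (PySem.List.sorted xs (fun s => s)).map (fun q => (q, f)) := by
  rw [PySem.List.sorted_eq_foldl_insertBy]
  have := foldl_insertBy_map_label f xs []
  simpa using this

theorem sorted2_split (P N : List String) :
    PySem.List.sorted2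
        (P.map (fun p => (p, false)) ++ N.map (fun p => (p, true)))
        (fun x : String × Bool => x.2) (fun x => x.1)
      = (PySem.List.sorted P (fun s => s)).map (fun p => (p, false))
        ++ (PySem.List.sorted N (fun s => s)).map (fun p => (p, true)) := by
  have hfold : PySem.List.sorted2
      (P.map (fun p => (p, false)) ++ N.map (fun p => (p, true)))
      (fun x : String × Bool => x.2) (fun x => x.1)
      = (P.map (fun p => (p, false)) ++ N.map (fun p => (p, true))).foldl
          (fun a x => PySem.List.insertBy pvB2 x a) [] := rfl
  rw [hfold, List.foldl_append]
  have hPflags : ∀ y ∈ P.map (fun p => (p, false)), (y : String × Bool).2 = false := by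
    intro y hy; simp only [List.mem_map] at hy; obtain ⟨p, _, rfl⟩ := hy; rfl
  have hNflags : ∀ y ∈ N.map (fun p => (p, true)), (y : String × Bool).2 = true := by
    intro y hy; simp only [List.mem_map] at hy; obtain ⟨p, _, rfl⟩ := hy; rfl
  rw [foldl_insertBy_b2_eq_b1 false _ [] hPflags (by simp), sorted_label false P]
  set SP := (PySem.List.sorted P (fun s => s)).map (fun p => (p, false)) with hSP
  have hSPflags : ∀ y ∈ SP, (y : String × Bool).2 = false := by
    intro y hy; rw [hSP] at hy; simp only [List.mem_map] at hy
    obtain ⟨p, _, rfl⟩ := hy; rfl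
  have := foldl_insertBy_b2_append SP hSPflags (N.map (fun p => (p, true))) [] hNflags
  simp only [List.append_nil] at this
  rw [this, foldl_insertBy_b2_eq_b1 true _ [] hNflags (by simp), sorted_label true N]

-- ===== VERDICT (by name: the statement is the Claim_ definition above) =====
theorem selected_tre_files_spec : Claim_equal_selected_tre_files := by
  intro positive_files negative_files _
  unfold Spec_selected_tre_files selected_tre_files selected_tre_files_alt
  exact sorted2_split positive_files (pvNegList negative_files)
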